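-- pv_equiv track=rewrite | github.com/augini/algorithms_ds | BinarySearch/arrays/rotate_left.py | solve
-- ===== SOURCE A (Python) =====
-- def solve(nums, k):
--
--     k = k % len(nums)
--
--     for i in range(3):
--         # reverse up to k
--         if i == 0:
--             left, right = 0, k-1
--         # reverse from k up to the end of list
--         elif i == 1:
--             left, right = k, len(nums) - 1
--         # reverse from beginning to end
--         else:
--             left, right = 0, len(nums) - 1
--
--         while left < right:
--             nums[left], nums[right] = nums[right], nums[left]
--             left+=1
--             right-=1
--
--     return nums
-- ===== SOURCE B (Python) =====
-- def solve(nums, k):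
--     k = k % len(nums)
--     nums[:] = nums[k:] + nums[:k]
--     return nums
-- ===== Notes on version B (the rewrite author's own statement) =====
-- stated objective: simpler
-- what changed: Replaces the three-pass in-place index-swapping reversal machinery with a single slice concatenation nums[k:] + nums[:k] assigned back in place.
import Mathlib
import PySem

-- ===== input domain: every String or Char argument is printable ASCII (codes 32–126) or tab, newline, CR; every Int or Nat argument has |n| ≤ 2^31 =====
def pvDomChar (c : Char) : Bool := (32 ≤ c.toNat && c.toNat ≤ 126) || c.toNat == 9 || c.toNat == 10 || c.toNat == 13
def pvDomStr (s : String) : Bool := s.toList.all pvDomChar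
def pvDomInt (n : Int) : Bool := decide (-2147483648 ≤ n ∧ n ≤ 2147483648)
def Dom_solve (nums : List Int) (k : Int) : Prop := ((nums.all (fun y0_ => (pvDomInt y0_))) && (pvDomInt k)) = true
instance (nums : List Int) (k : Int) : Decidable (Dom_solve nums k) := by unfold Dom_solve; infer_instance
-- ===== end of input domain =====

-- B mutates `nums` in place exactly as A does (full-slice assignment); the equivalence proved here is about the return value.

-- ===== PORT A =====
-- tuple assignment nums[l], nums[r] = nums[r], nums[l]; indices are in range on every admitted input
def pvSwap (xs : List Int) (l r : Int) : List Int :=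
  (xs.set l.toNat (xs.getD r.toNat 0)).set r.toNat (xs.getD l.toNat 0)

-- the `while left < right` swap loop
def pvRevSeg (xs : List Int) (l r : Int) : List Int :=
  if l < r then pvRevSeg (pvSwap xs l r) (l + 1) (r - 1) else xs
termination_by (r - l).toNat
decreasing_by omega

def solve (nums : List Int) (k : Int) : List Int :=
  let k' := PySem.Int.mod k (nums.length : Int)
  pvRevSeg (pvRevSeg (pvRevSeg nums 0 (k' - 1)) k' ((nums.length : Int) - 1)) 0 ((nums.length : Int) - 1)

-- ===== PORT B =====
def solve_alt (nums : List Int) (k : Int) : List Int :=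
  let k' := PySem.Int.mod k (nums.length : Int)
  PySem.List.slice nums (some k') none ++ PySem.List.slice nums none (some k')

-- ===== PRECONDITION & SPEC =====
-- Pre_ excludes only the empty list, on which A raises ZeroDivisionError (k % len(nums)); B raises there too.
def Pre_solve (nums : List Int) (k : Int) : Prop := nums ≠ []
instance (nums : List Int) (k : Int) : Decidable (Pre_solve nums k) := by unfold Pre_solve; infer_instance
def pvWitness_solve : List Int × Int := ([1, 2, 3], 1)

def Spec_solve (nums : List Int) (k : Int) (out : List Int) : Prop := out = solve_alt nums k
instance (nums : List Int) (k : Int) (out : List Int) : Decidable (Spec_solve nums k out) := by unfold Spec_solve; infer_instance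

-- ===== CLAIM (what is proved, stated in full; the proofs are below) =====
def Claim_equal_solve : Prop := ∀ (nums : List Int) (k : Int), Dom_solve nums k → Pre_solve nums k → Spec_solve nums k (solve nums k)

-- ===== LEMMAS AND PROOFS =====

theorem pv_getD_mid (a b : List Int) (x : Int) : (a ++ x :: b).getD a.length 0 = x := by
  induction a with
  | nil => simp
  | cons h t ih => simp

theorem pv_set_mid (a b : List Int) (x v : Int) : (a ++ x :: b).set a.length v = a ++ v :: b := by
  induction a with
  | nil => simp
  | cons h t ih => simp [ih]

theorem pvRevSeg_spec (n : Nat) : ∀ (m a b : List Int), m.length = n →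
    pvRevSeg (a ++ m ++ b) (a.length : Int) ((a.length : Int) + (m.length : Int) - 1)
      = a ++ m.reverse ++ b := by
  induction n using Nat.strong_induction_on with
  | _ n ih =>
    intro m a b hlen
    match m with
    | [] =>
      unfold pvRevSeg
      rw [if_neg (by simp only [List.length_nil, Nat.cast_zero]; omega)]
      simp
    | x :: m' =>
      rcases List.eq_nil_or_concat m' with h | ⟨m'', y, h⟩
      · subst h
        unfold pvRevSeg
        rw [if_neg (by simp only [List.length_cons, List.length_nil, Nat.cast_one, Nat.cast_add]; omega)]
        simp
      · subst h
        simp only [List.concat_eq_append] at hlen ⊢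
        have hL : ((x :: (m'' ++ [y])).length : Int) = (m''.length : Int) + 2 := by
          simp only [List.length_cons, List.length_append, List.length_nil]
          omega
        unfold pvRevSeg
        rw [if_pos (by rw [hL]; omega)]
        have hswap :
            pvSwap (a ++ (x :: (m'' ++ [y])) ++ b) (a.length : Int)
              ((a.length : Int) + ((x :: (m'' ++ [y])).length : Int) - 1)
            = (a ++ [y]) ++ m'' ++ (x :: b) := by
          have hr : (((a.length : Int) + ((x :: (m'' ++ [y])).length : Int) - 1)).toNat
              = (a ++ x :: m'').length := by
            rw [hL]; simp only [List.length_append, List.length_cons]; omega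
          have hl : ((a.length : Int)).toNat = a.length := by simp
          unfold pvSwap
          rw [hr, hl]
          have g1 : (a ++ (x :: (m'' ++ [y])) ++ b).getD (a ++ x :: m'').length 0 = y := by
            have e : a ++ (x :: (m'' ++ [y])) ++ b = (a ++ x :: m'') ++ y :: b := by simp
            rw [e, pv_getD_mid]
          have g2 : (a ++ (x :: (m'' ++ [y])) ++ b).getD a.length 0 = x := by
            have e : a ++ (x :: (m'' ++ [y])) ++ b = a ++ x :: (m'' ++ y :: b) := by simp
            rw [e, pv_getD_mid]
          rw [g1, g2]
          have st1 : (a ++ (x :: (m'' ++ [y])) ++ b).set a.length y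
              = (a ++ y :: m'') ++ y :: b := by
            have e : a ++ (x :: (m'' ++ [y])) ++ b = a ++ x :: (m'' ++ y :: b) := by simp
            rw [e, pv_set_mid]; simp
          rw [st1]
          have hlen2 : (a ++ x :: m'').length = (a ++ y :: m'').length := by simp
          rw [hlen2, pv_set_mid]
          simp
        rw [hswap]
        have harg1 : (a.length : Int) + 1 = (((a ++ [y]).length : Nat) : Int) := by
          simp only [List.length_append, List.length_singleton]; push_cast; ring
        have harg2 : (a.length : Int) + ((x :: (m'' ++ [y])).length : Int) - 1 - 1
            = (((a ++ [y]).length : Nat) : Int) + (m''.length : Int) - 1 := by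
          rw [hL]; simp only [List.length_append, List.length_singleton]; push_cast; ring
        rw [harg1, harg2,
          ih m''.length (by simp only [List.length_cons, List.length_append] at hlen; omega) m'' (a ++ [y]) (x :: b) rfl]
        simp

-- ===== VERDICT (by name: the statement is the Claim_ definition above) =====
theorem solve_spec : Claim_equal_solve := by
  intro nums k _ hpre
  have hn : 0 < nums.length := List.length_pos_iff.mpr hpre
  simp only [Spec_solve, solve, solve_alt]
  set k' : Int := PySem.Int.mod k (nums.length : Int) with hk'
  have hk'emod : k' = k % (nums.length : Int) := by
    rw [hk']; exact PySem.Int.mod_eq_emod_of_pos (by exact_mod_cast hn)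
  have hk0 : 0 ≤ k' := by rw [hk'emod]; exact Int.emod_nonneg _ (by positivity)
  have hklt : k' < (nums.length : Int) := by
    rw [hk'emod]; exact Int.emod_lt_of_pos _ (by exact_mod_cast hn)
  set j : Nat := k'.toNat with hj
  have hjk : (j : Int) = k' := Int.toNat_of_nonneg hk0
  have hjle : j ≤ nums.length := by omega
  have hlt : (nums.take j).length = j := by simp [hjle]
  have hld : (nums.drop j).length = nums.length - j := by simp
  -- step 1: reverse nums[0:k']
  have s1 : pvRevSeg nums 0 (k' - 1) = (nums.take j).reverse ++ nums.drop j := by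
    have h := pvRevSeg_spec (nums.take j).length (nums.take j) [] (nums.drop j) rfl
    simp only [List.nil_append, List.length_nil, Nat.cast_zero, zero_add,
      List.take_append_drop] at h
    rw [hlt, hjk] at h
    exact h
  -- step 2: reverse nums[k':n]
  have s2 : pvRevSeg ((nums.take j).reverse ++ nums.drop j) k' ((nums.length : Int) - 1)
      = (nums.take j).reverse ++ (nums.drop j).reverse := by
    have h := pvRevSeg_spec (nums.drop j).length (nums.drop j) (nums.take j).reverse [] rfl
    simp only [List.append_nil, List.length_reverse] at h
    rw [hlt, hld] at h
    have e : (j : Int) + ((nums.length - j : Nat) : Int) - 1 = (nums.length : Int) - 1 := by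
      omega
    rw [e, hjk] at h
    exact h
  -- step 3: reverse the whole list
  have s3 : pvRevSeg ((nums.take j).reverse ++ (nums.drop j).reverse) 0 ((nums.length : Int) - 1)
      = nums.drop j ++ nums.take j := by
    have hlen3 : ((nums.take j).reverse ++ (nums.drop j).reverse).length = nums.length := by
      simp only [List.length_append, List.length_reverse, hlt, hld]; omega
    have h := pvRevSeg_spec _ ((nums.take j).reverse ++ (nums.drop j).reverse) [] [] rfl
    simp only [List.nil_append, List.append_nil, List.length_nil, Nat.cast_zero, zero_add] at h
    rw [hlen3] at h
    rw [List.reverse_append, List.reverse_reverse, List.reverse_reverse] at h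
    exact h
  rw [s1, s2, s3]
  rw [PySem.List.slice_from nums hk0, PySem.List.slice_to nums hk0]
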